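-- pv_equiv track=rewrite | github.com/mezcalpapieth-jpg/pronos | docs/export_prd.py | rtf_escape
-- ===== SOURCE A (Python) =====
-- def rtf_escape(text: str) -> str:
--     text = text.replace("\\", "\\\\").replace("{", "\\{").replace("}", "\\}")
--     out = []
--     for ch in text:
--         code = ord(ch)
--         if ch == "\n":
--             out.append("\\line ")
--         elif 32 <= code <= 126:
--             out.append(ch)
--         else:
--             signed = code - 65536 if code > 32767 else code
--             out.append(f"\\u{signed}?")
--     return "".join(out)
-- ===== SOURCE B (Python) =====
-- _RTF_SPECIAL = {"\\": "\\\\", "{": "\\{", "}": "\\}", "\n": "\\line "}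
--
--
-- def _rtf_escape_char(ch):
--     s = _RTF_SPECIAL.get(ch)
--     if s is not None:
--         return s
--     code = ord(ch)
--     if 32 <= code <= 126:
--         return ch
--     signed = code - 65536 if code > 32767 else code
--     return "\\u%d?" % signed
--
--
-- def rtf_escape(text: str) -> str:
--     return "".join(map(_rtf_escape_char, text))
-- ===== Notes on version B (the rewrite author's own statement) =====
-- stated objective: simpler
-- what changed: Replaced A's three full replace() pre-passes plus an append loop with a single map over the characters using a lookup table of the four special escapes, so the input is traversed once and injected escapes can never be re-escaped.
import Mathlib
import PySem

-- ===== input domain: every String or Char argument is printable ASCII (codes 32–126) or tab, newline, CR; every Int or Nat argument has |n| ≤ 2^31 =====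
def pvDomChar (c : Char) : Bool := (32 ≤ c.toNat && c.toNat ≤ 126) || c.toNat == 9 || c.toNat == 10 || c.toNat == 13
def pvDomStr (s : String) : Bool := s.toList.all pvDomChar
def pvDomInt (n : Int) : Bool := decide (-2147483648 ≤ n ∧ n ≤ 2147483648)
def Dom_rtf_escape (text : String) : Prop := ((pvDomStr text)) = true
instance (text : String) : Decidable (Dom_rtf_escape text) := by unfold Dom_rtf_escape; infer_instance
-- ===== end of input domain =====

-- B replaces A's three replace() pre-passes + loop with a single map over the characters using a lookup table of the special escapes (simpler).


-- ===== PORT A =====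
def rtf_escape (text : String) : String :=
  let text := PySem.Str.replace (PySem.Str.replace (PySem.Str.replace text "\\" "\\\\") "{" "\\{") "}" "\\}"
  let out : List String := text.toList.foldl (fun out ch =>
    let code : Int := ch.toNat
    if ch = '\n' then out ++ ["\\line "]
    else if 32 ≤ code ∧ code ≤ 126 then out ++ [String.ofList [ch]]
    else
      let signed : Int := if code > 32767 then code - 65536 else code
      out ++ ["\\u" ++ PySem.Int.toStr signed ++ "?"]) []
  PySem.Str.join "" out

-- ===== PORT B =====
def pvRtfSpecial : PySem.Dict String String :=
  PySem.Dict.ofList [("\\", "\\\\"), ("{", "\\{"), ("}", "\\}"), ("\n", "\\line ")]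

def pvRtfEscapeChar (ch : Char) : String :=
  match pvRtfSpecial.get? (String.ofList [ch]) with
  | some s => s
  | none =>
    let code : Int := ch.toNat
    if 32 ≤ code ∧ code ≤ 126 then String.ofList [ch]
    else
      let signed : Int := if code > 32767 then code - 65536 else code
      "\\u" ++ PySem.Int.toStr signed ++ "?"

def rtf_escape_alt (text : String) : String :=
  PySem.Str.join "" (text.toList.map pvRtfEscapeChar)

-- ===== PRECONDITION & SPEC =====
def Spec_rtf_escape (text : String) (out : String) : Prop := out = rtf_escape_alt text
instance (text : String) (out : String) : Decidable (Spec_rtf_escape text out) := by unfold Spec_rtf_escape; infer_instance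

-- ===== CLAIM (what is proved, stated in full; the proofs are below) =====
def Claim_equal_rtf_escape : Prop := ∀ (text : String), Dom_rtf_escape text → Spec_rtf_escape text (rtf_escape text)

-- ===== LEMMAS AND PROOFS =====

-- single-character replace is a flatMap over the characters
lemma replace_go_single (a : Char) (new : List Char) :
    ∀ (l acc : List Char), PySem.Chars.replace.go [a] new l.length l acc
      = acc.reverse ++ l.flatMap (fun c => if c = a then new else [c]) := by
  intro l
  induction l with
  | nil => intro acc; simp [PySem.Chars.replace.go]
  | cons c t ih =>
    intro acc
    show PySem.Chars.replace.go [a] new (t.length + 1) (c :: t) acc = _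
    rw [PySem.Chars.replace.go]
    by_cases h : c = a
    · subst h
      simp [List.isPrefixOf, ih]
    · have hp : [a].isPrefixOf (c :: t) = false := by
        simp [List.isPrefixOf]; exact fun hh => absurd hh.symm h
      simp [hp, ih, h]

lemma replace_single (a : Char) (new l : List Char) :
    PySem.Chars.replace l [a] new = l.flatMap (fun c => if c = a then new else [c]) := by
  rw [PySem.Chars.replace]
  simp [replace_go_single]

-- the per-character piece A's loop emits
def pvEscA (ch : Char) : String :=
  let code : Int := ch.toNat
  if ch = '\n' then "\\line "
  else if 32 ≤ code ∧ code ≤ 126 then String.ofList [ch]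
  else
    let signed : Int := if code > 32767 then code - 65536 else code
    "\\u" ++ PySem.Int.toStr signed ++ "?"

def pvE1 (c : Char) : List Char := if c = '\\' then ['\\', '\\'] else [c]
def pvE2 (c : Char) : List Char := if c = '{' then ['\\', '{'] else [c]
def pvE3 (c : Char) : List Char := if c = '}' then ['\\', '}'] else [c]

lemma foldl_step_map {α β : Type} (f : List β → α → List β) (g : α → β)
    (hf : ∀ acc x, f acc x = acc ++ [g x]) :
    ∀ (l : List α) (acc : List β), l.foldl f acc = acc ++ l.map g := by
  intro l
  induction l with
  | nil => simp
  | cons c t ih => intro acc; rw [List.foldl_cons, hf, ih]; simp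

lemma intersperse_nil_flatten {α : Type} :
    ∀ (L : List (List α)), (List.intersperse [] L).flatten = L.flatten := by
  intro L
  induction L with
  | nil => rfl
  | cons a t ih =>
    cases t with
    | nil => rfl
    | cons b u =>
      rw [show List.intersperse ([] : List α) (a :: b :: u)
            = a :: [] :: List.intersperse [] (b :: u) from by simp [List.intersperse]]
      simp [ih]

lemma join_empty_toList (parts : List String) :
    (PySem.Str.join "" parts).toList = (parts.map String.toList).flatten := by
  rw [PySem.Str.toList_join]
  show List.intercalate [] _ = _
  rw [List.intercalate, intersperse_nil_flatten]

-- on a non-special char the table lookup misses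
lemma lookup_miss (c : Char) (h1 : c ≠ '\\') (h2 : c ≠ '{') (h3 : c ≠ '}') (h4 : c ≠ '\n') :
    pvRtfSpecial.get? (String.ofList [c]) = none := by
  have key : ∀ a : Char, (String.ofList [c] = String.ofList [a]) ↔ c = a := by
    intro a
    constructor
    · intro h
      have := congrArg String.toList h
      simpa using this
    · intro h; rw [h]
  have b1 : (("\\" : String) == String.ofList [c]) = false := by
    rw [beq_eq_false_iff_ne]
    exact fun h => h1 ((key '\\').mp h.symm)
  have b2 : (("{" : String) == String.ofList [c]) = false := by
    rw [beq_eq_false_iff_ne]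
    exact fun h => h2 ((key '{').mp h.symm)
  have b3 : (("}" : String) == String.ofList [c]) = false := by
    rw [beq_eq_false_iff_ne]
    exact fun h => h3 ((key '}').mp h.symm)
  have b4 : (("\n" : String) == String.ofList [c]) = false := by
    rw [beq_eq_false_iff_ne]
    exact fun h => h4 ((key '\n').mp h.symm)
  have hd : pvRtfSpecial
      = PySem.Dict.mk [("\\", "\\\\"), ("{", "\\{"), ("}", "\\}"), ("\n", "\\line ")] := by decide
  rw [hd]
  simp [b1, b2, b3, b4, PySem.Dict.get?]

-- per original character: the three replace passes followed by A's escaping equal B's table lookup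
lemma pointwise (c : Char) :
    (((pvE1 c).flatMap pvE2).flatMap pvE3).flatMap (fun d => (pvEscA d).toList)
      = (pvRtfEscapeChar c).toList := by
  by_cases h1 : c = '\\'
  · subst h1; decide
  · by_cases h2 : c = '{'
    · subst h2; decide
    · by_cases h3 : c = '}'
      · subst h3; decide
      · by_cases h4 : c = '\n'
        · subst h4; decide
        · rw [pvRtfEscapeChar, lookup_miss c h1 h2 h3 h4]
          simp [pvE1, pvE2, pvE3, h1, h2, h3, h4, pvEscA]

lemma toList_eq (text : String) : (rtf_escape text).toList = (rtf_escape_alt text).toList := by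
  show (PySem.Str.join "" _).toList = (PySem.Str.join "" _).toList
  rw [join_empty_toList, join_empty_toList,
    foldl_step_map _ pvEscA (by
      intro acc x
      simp only [pvEscA]
      split_ifs <;> rfl)]
  have htr : (PySem.Str.replace (PySem.Str.replace (PySem.Str.replace text "\\" "\\\\") "{" "\\{") "}" "\\}").toList
      = ((text.toList.flatMap pvE1).flatMap pvE2).flatMap pvE3 := by
    rw [PySem.Str.toList_replace, PySem.Str.toList_replace, PySem.Str.toList_replace,
      show ("\\" : String).toList = ['\\'] from rfl,
      show ("{" : String).toList = ['{'] from rfl,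
      show ("}" : String).toList = ['}'] from rfl,
      replace_single, replace_single, replace_single]
    unfold pvE1 pvE2 pvE3
    rfl
  rw [htr]
  simp only [List.nil_append, List.map_map, Function.comp_def, ← List.flatMap_def,
    List.flatMap_assoc]
  have hpt : (fun x => List.flatMap
        (fun x => List.flatMap (fun x => List.flatMap (fun x => (pvEscA x).toList) (pvE3 x)) (pvE2 x))
        (pvE1 x))
      = fun x => (pvRtfEscapeChar x).toList :=
    funext fun c => by simpa [List.flatMap_assoc] using pointwise c
  rw [hpt]

-- ===== VERDICT (by name: the statement is the Claim_ definition above) =====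
theorem rtf_escape_spec : Claim_equal_rtf_escape := by
  intro text _
  show rtf_escape text = rtf_escape_alt text
  exact String.toList_injective (toList_eq text)
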